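-- pv_equiv track=rewrite | github.com/CherryCocacola/nexus | core/tools/implementations/notebook_tools.py | _source_to_lines
-- ===== SOURCE A (Python) =====
-- def _source_to_lines(source: str) -> list[str]:
--     """
--     소스 문자열을 Jupyter 표준 형식(줄 단위 리스트)으로 변환한다.
--     각 줄(마지막 제외)에 개행 문자를 포함한다.
--     """
--     if not source:
--         return []
--     lines = source.split("\n")
--     # 마지막 줄을 제외한 모든 줄에 \n 추가
--     result = [line + "\n" for line in lines[:-1]]
--     # 마지막 줄은 개행 없이 추가 (빈 문자열이 아닌 경우)
--     if lines[-1]: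
--         result.append(lines[-1])
--     return result
-- ===== SOURCE B (Python) =====
-- def _source_to_lines(source: str) -> list[str]:
--     # Single left-to-right scan: accumulate characters of the current line and
--     # emit it (newline included) whenever '\n' is seen; emit a final
--     # newline-less tail only if it is nonempty.
--     result = []
--     cur = []
--     for ch in source:
--         cur.append(ch)
--         if ch == "\n":
--             result.append("".join(cur))
--             cur = []
--     if cur:
--         result.append("".join(cur))
--     return result
-- ===== Notes on version B (the rewrite author's own statement) =====
-- stated objective: alternative
-- what changed: Replaces the newline-split plus list rebuilding (slice, per-line concatenation, conditional tail append) with a single character scan that emits each line, newline included, as soon as it is completed.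
import Mathlib
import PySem

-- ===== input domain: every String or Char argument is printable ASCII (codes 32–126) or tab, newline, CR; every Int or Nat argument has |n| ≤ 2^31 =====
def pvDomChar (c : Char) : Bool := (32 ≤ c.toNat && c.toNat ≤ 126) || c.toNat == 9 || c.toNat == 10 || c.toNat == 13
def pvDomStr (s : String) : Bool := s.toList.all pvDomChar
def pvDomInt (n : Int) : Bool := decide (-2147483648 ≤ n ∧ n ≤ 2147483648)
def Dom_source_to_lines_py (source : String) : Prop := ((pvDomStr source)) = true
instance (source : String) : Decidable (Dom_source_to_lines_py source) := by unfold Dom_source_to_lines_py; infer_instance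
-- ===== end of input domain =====

-- B replaces split-then-rebuild with a single character scan emitting each completed line; alternative decomposition, same cost.

-- ===== PORT A =====
-- literal port of A: empty guard, split on "\n", add "\n" to all but the last, append nonempty last
def source_to_lines_py (source : String) : List String :=
  if source = "" then []
  else
    match PySem.Str.split? source "\n" with
    | none => []  -- unreachable: the separator "\n" is nonempty
    | some lines =>
      let result := (PySem.List.slice lines none (some (-1))).map (fun line => line ++ "\n")
      match PySem.List.pyGet? lines (-1) with
      | some last => if last ≠ "" then result ++ [last] else result
      | none => result  -- unreachable: split never returns an empty list

-- ===== PORT B =====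
-- literal port of B's scan loop: state = (remaining chars, current line chars, emitted lines)
def sourceToLinesLoop : List Char → List Char → List String → List String
  | [], cur, result => if cur ≠ [] then result ++ [String.ofList cur] else result
  | c :: rest, cur, result =>
      let cur' := cur ++ [c]
      if c = '\n' then sourceToLinesLoop rest [] (result ++ [String.ofList cur'])
      else sourceToLinesLoop rest cur' result

def source_to_lines_py_alt (source : String) : List String :=
  sourceToLinesLoop source.toList [] []

-- ===== PRECONDITION & SPEC =====
def Spec_source_to_lines_py (source : String) (out : List String) : Prop := out = source_to_lines_py_alt source
instance (source : String) (out : List String) : Decidable (Spec_source_to_lines_py source out) := by unfold Spec_source_to_lines_py; infer_instance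

-- ===== CLAIM (what is proved, stated in full; the proofs are below) =====
def Claim_equal_source_to_lines_py : Prop := ∀ (source : String), Dom_source_to_lines_py source → Spec_source_to_lines_py source (source_to_lines_py source)

-- ===== LEMMAS AND PROOFS =====

-- prepend a prefix onto the first piece
def consH (p : List Char) : List (List Char) → List (List Char)
  | [] => [p]
  | x :: xs => (p ++ x) :: xs

-- simple recursive characterisation of splitting on '\n'
def splitNl : List Char → List (List Char)
  | [] => [[]]
  | c :: rest => if c = '\n' then [] :: splitNl rest else consH [c] (splitNl rest)

theorem splitNl_ne_nil (cs : List Char) : splitNl cs ≠ [] := by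
  induction cs with
  | nil => simp [splitNl]
  | cons c rest ih =>
    simp only [splitNl]
    split
    · simp
    · cases h : splitNl rest with
      | nil => exact absurd h ih
      | cons x xs => simp [consH]

theorem consH_nil_of_ne (xs : List (List Char)) (h : xs ≠ []) : consH [] xs = xs := by
  cases xs with
  | nil => exact absurd rfl h
  | cons x xs => simp [consH]

theorem consH_consH (a b : List Char) (xs : List (List Char)) :
    consH a (consH b xs) = consH (a ++ b) xs := by
  cases xs <;> simp [consH]

theorem splitOn_go_nl (fuel : Nat) (l cur : List Char) (acc : List (List Char))
    (h : l.length ≤ fuel) :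
    PySem.Chars.splitOn.go ['\n'] fuel l cur acc
      = acc.reverse ++ consH cur.reverse (splitNl l) := by
  induction fuel generalizing l cur acc with
  | zero =>
    have : l = [] := List.eq_nil_of_length_eq_zero (Nat.le_zero.mp h)
    subst this
    simp [PySem.Chars.splitOn.go, splitNl, consH]
  | succ fuel ih =>
    cases l with
    | nil => simp [PySem.Chars.splitOn.go, splitNl, consH]
    | cons c rest =>
      simp only [PySem.Chars.splitOn.go]
      by_cases hc : c = '\n'
      · subst hc
        have hpre : List.isPrefixOf ['\n'] ('\n' :: rest) = true := by
          simp [List.isPrefixOf]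
        simp only [hpre, if_pos]
        rw [show List.drop ['\n'].length ('\n' :: rest) = rest from rfl]
        rw [ih rest [] (cur.reverse :: acc) (by simpa using Nat.le_of_succ_le_succ h)]
        rw [List.reverse_nil, consH_nil_of_ne _ (splitNl_ne_nil rest)]
        simp [splitNl, consH]
      · have hpre : List.isPrefixOf ['\n'] (c :: rest) = false := by
          simp [List.isPrefixOf]
          exact fun h' => absurd h'.symm hc
        simp only [hpre, Bool.false_eq_true, if_false]
        rw [ih rest (c :: cur) acc (by simpa using Nat.le_of_succ_le_succ h)]
        rw [splitNl, if_neg hc, List.reverse_cons, consH_consH]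

theorem splitOn_nl (cs : List Char) :
    PySem.Chars.splitOn cs ['\n'] = splitNl cs := by
  unfold PySem.Chars.splitOn
  rw [splitOn_go_nl _ _ _ _ (by omega)]
  simp [consH_nil_of_ne _ (splitNl_ne_nil cs)]

-- the Jupyter-line assembly of a split result
def assemble (lines : List (List Char)) : List String :=
  (lines.dropLast.map (fun l => String.ofList (l ++ ['\n']))) ++
    (match lines.getLast? with
     | some last => if last ≠ [] then [String.ofList last] else []
     | none => [])

theorem sourceToLinesLoop_acc (cs cur : List Char) (res : List String) :
    sourceToLinesLoop cs cur res = res ++ sourceToLinesLoop cs cur [] := by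
  induction cs generalizing cur res with
  | nil => simp only [sourceToLinesLoop]; split <;> simp
  | cons c rest ih =>
    simp only [sourceToLinesLoop]
    split
    · rw [ih _ (res ++ [String.ofList (cur ++ [c])]), ih _ ([] ++ [String.ofList (cur ++ [c])])]
      simp
    · rw [ih _ res]

theorem assemble_cons (x : List Char) (xs : List (List Char)) (h : xs ≠ []) :
    assemble (x :: xs) = String.ofList (x ++ ['\n']) :: assemble xs := by
  cases xs with
  | nil => exact absurd rfl h
  | cons y ys => simp [assemble]

theorem sourceToLinesLoop_eq (cs cur : List Char) :
    sourceToLinesLoop cs cur [] = assemble (consH cur (splitNl cs)) := by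
  induction cs generalizing cur with
  | nil =>
    simp only [sourceToLinesLoop, splitNl, consH, List.append_nil, assemble]
    split <;> simp_all
  | cons c rest ih =>
    simp only [sourceToLinesLoop]
    by_cases hc : c = '\n'
    · subst hc
      rw [if_pos rfl]
      rw [sourceToLinesLoop_acc, List.nil_append, ih []]
      rw [consH_nil_of_ne _ (splitNl_ne_nil rest)]
      rw [splitNl, if_pos rfl, consH]
      rw [assemble_cons _ _ (splitNl_ne_nil rest)]
      simp
    · simp only [if_neg hc]
      rw [ih (cur ++ [c])]
      rw [splitNl, if_neg hc, ← consH_consH]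

theorem alt_eq_assemble (source : String) :
    source_to_lines_py_alt source = assemble (splitNl source.toList) := by
  unfold source_to_lines_py_alt
  rw [sourceToLinesLoop_eq, consH_nil_of_ne _ (splitNl_ne_nil _)]

theorem mk_toList (s : String) : String.ofList s.toList = s := by
  simp

theorem mk_append_newline (l : List Char) :
    String.ofList l ++ "\n" = String.ofList (l ++ ['\n']) := by
  rw [← mk_toList (String.ofList l ++ "\n")]
  congr 1
  simp

theorem split?_nl (source : String) :
    PySem.Str.split? source "\n" = some ((splitNl source.toList).map String.ofList) := by
  have h := PySem.Str.split?_map source "\n"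
  have hc : PySem.Chars.split? source.toList "\n".toList
      = some (splitNl source.toList) := by
    rw [show ("\n".toList) = ['\n'] from rfl]
    simp [PySem.Chars.split?, splitOn_nl]
  rw [hc] at h
  cases hs : PySem.Str.split? source "\n" with
  | none => rw [hs] at h; simp at h
  | some lines =>
    rw [hs] at h
    simp only [Option.map_some, Option.some.injEq] at h
    congr 1
    have h2 : lines.map (String.ofList ∘ String.toList)
        = (splitNl source.toList).map String.ofList := by
      rw [← List.map_map, h]
    simpa [Function.comp_def, mk_toList] using h2

-- A's assembly step, named for the proof (definitionally the body of A's port after the split)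
def aAssemble (lines : List String) : List String :=
  let result := (PySem.List.slice lines none (some (-1))).map (fun line => line ++ "\n")
  match PySem.List.pyGet? lines (-1) with
  | some last => if last ≠ "" then result ++ [last] else result
  | none => result

theorem aAssemble_eq (x : List Char) (xs : List (List Char)) :
    aAssemble ((x :: xs).map String.ofList) = assemble (x :: xs) := by
  induction xs generalizing x with
  | nil =>
    simp only [aAssemble, PySem.List.slice_to_neg_one, PySem.List.pyGet?_neg_one,
      List.map_cons, List.map_nil, assemble]
    simp
  | cons y ys ih =>
    rw [assemble_cons _ _ (by simp)]
    rw [← ih y]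
    simp only [aAssemble, PySem.List.slice_to_neg_one, PySem.List.pyGet?_neg_one,
      List.map_cons, List.getLast?_cons_cons, List.dropLast_cons₂, mk_append_newline]
    cases hg : (String.ofList y :: ys.map String.ofList).getLast? with
    | none => simp at hg
    | some last =>
      dsimp only
      split_ifs <;> simp

theorem a_eq_assemble (source : String) :
    source_to_lines_py source = assemble (splitNl source.toList) := by
  unfold source_to_lines_py
  by_cases hs : source = ""
  · subst hs
    simp [splitNl, assemble]
  · rw [if_neg hs, split?_nl]
    obtain ⟨x, xs, hl⟩ := List.exists_cons_of_ne_nil (splitNl_ne_nil source.toList)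
    rw [hl]
    exact aAssemble_eq x xs

-- ===== VERDICT (by name: the statement is the Claim_ definition above) =====
theorem source_to_lines_py_spec : Claim_equal_source_to_lines_py := by
  intro source _
  unfold Spec_source_to_lines_py
  rw [a_eq_assemble, alt_eq_assemble]
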